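-- pv_equiv track=rewrite | github.com/getdataforme/checklists-before-trying | pyvirtual_display.py | is_html_blocked
-- ===== SOURCE A (Python) =====
-- def is_html_blocked(html: str) -> bool:
--     """Check if the response indicates we're being blocked"""
--     blocking_indicators = [
--         "Please verify you are a human",
--         "Please solve this CAPTCHA",
--         "Access to this page has been denied",
--         "Your IP address has been temporarily blocked"
--     ]
--     return any(indicator.lower() in html.lower() for indicator in blocking_indicators)
-- ===== SOURCE B (Python) =====
-- def is_html_blocked(html: str) -> bool:
--     """Check if the response indicates we're being blocked"""
--     phrases = [
--         "please verify you are a human",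
--         "please solve this captcha",
--         "access to this page has been denied",
--         "your ip address has been temporarily blocked",
--     ]
--     # Build a character trie of the phrases once; "" key marks an accepted phrase end.
--     root = {}
--     for p in phrases:
--         node = root
--         for ch in p:
--             node = node.setdefault(ch, {})
--         node[""] = True
--     # Walk the trie from every starting position of the lowercased html.
--     h = html.lower()
--     n = len(h)
--     for i in range(n):
--         node = root
--         j = i
--         while True:
--             if "" in node:
--                 return True
--             if j >= n or h[j] not in node:
--                 break
--             node = node[h[j]]
--             j += 1
--     return False
-- ===== Notes on version B (the rewrite author's own statement) =====
-- stated objective: alternative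
-- what changed: B builds a character trie (prefix tree) of the pre-lowered phrases once and, after lowercasing the html a single time, walks the trie from each position, so all four phrases are matched simultaneously by one shared structure instead of four independent substring searches each re-lowering the whole html.
import Mathlib
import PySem

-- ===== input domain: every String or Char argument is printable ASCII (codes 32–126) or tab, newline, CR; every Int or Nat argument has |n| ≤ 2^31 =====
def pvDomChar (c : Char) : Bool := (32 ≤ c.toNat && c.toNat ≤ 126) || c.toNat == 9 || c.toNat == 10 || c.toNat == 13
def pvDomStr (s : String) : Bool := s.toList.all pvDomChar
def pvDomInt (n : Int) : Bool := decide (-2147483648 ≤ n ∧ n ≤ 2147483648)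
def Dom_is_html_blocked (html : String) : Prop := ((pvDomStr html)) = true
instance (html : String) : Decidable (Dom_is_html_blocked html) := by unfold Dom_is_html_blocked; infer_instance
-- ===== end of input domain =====

-- B builds a character trie of the pre-lowered phrases once and walks it from each position of
-- the once-lowered html, instead of A's four independent substring searches each re-lowering the html.


-- ===== PORT A =====
def is_html_blocked (html : String) : Bool :=
  let blocking_indicators : List String :=
    [ "Please verify you are a human",
      "Please solve this CAPTCHA",
      "Access to this page has been denied",
      "Your IP address has been temporarily blocked" ]
  blocking_indicators.any (fun indicator =>
    PySem.Str.isIn (PySem.Str.lower indicator) (PySem.Str.lower html))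

-- ===== PORT B =====
-- the four phrases, already lowercase, as char lists
def pvPhrases : List (List Char) :=
  [ "please verify you are a human".toList,
    "please solve this captcha".toList,
    "access to this page has been denied".toList,
    "your ip address has been temporarily blocked".toList ]

-- a character trie: node (stop flag = Python's "" end marker) with an ordered child list
-- (mutual pair instead of a nested inductive, as required)
mutual
inductive PvTrie : Type where
  | node : Bool → PvKids → PvTrie
  deriving DecidableEq, Repr
inductive PvKids : Type where
  | nil : PvKids
  | cons : Char → PvTrie → PvKids → PvKids
  deriving DecidableEq, Repr
end

-- child lookup (Python: 'h[j] in node' / 'node[h[j]]')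
def pvFind (c : Char) : PvKids → Option PvTrie
  | .nil => none
  | .cons d t rest => if d = c then some t else pvFind c rest

-- trie insertion of one phrase (Python: node.setdefault walk + end marker)
mutual
def pvInsertT : PvTrie → List Char → PvTrie
  | .node _ ch, [] => .node true ch
  | .node stop ch, c :: p => .node stop (pvInsertK ch c p)
  termination_by _ p => (p.length, 0)
def pvInsertK : PvKids → Char → List Char → PvKids
  | .nil, c, p => .cons c (pvInsertT (.node false .nil) p) .nil
  | .cons d t rest, c, p =>
      if d = c then .cons d (pvInsertT t p) rest else .cons d t (pvInsertK rest c p)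
  termination_by ch _ p => (p.length, sizeOf ch + 1)
end

-- the trie of all four phrases, built once
def pvRoot : PvTrie := pvPhrases.foldl pvInsertT (.node false .nil)

-- the inner while-loop: walk the trie along the suffix, True on an end marker
def pvAccepts : PvTrie → List Char → Bool
  | .node stop _, [] => stop
  | .node stop ch, c :: r =>
      stop || (match pvFind c ch with
               | none => false
               | some t => pvAccepts t r)
  termination_by _ l => l.length

-- the outer for-loop: try every starting position of the lowered html
def pvScanT (t : PvTrie) : List Char → Bool
  | [] => false
  | c :: r => pvAccepts t (c :: r) || pvScanT t r

def is_html_blocked_alt (html : String) : Bool :=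
  pvScanT pvRoot (PySem.Str.lower html).toList

-- ===== PRECONDITION & SPEC =====
def Spec_is_html_blocked (html : String) (out : Bool) : Prop := out = is_html_blocked_alt html
instance (html : String) (out : Bool) : Decidable (Spec_is_html_blocked html out) := by unfold Spec_is_html_blocked; infer_instance

-- ===== CLAIM =====
def Claim_equal_is_html_blocked : Prop := ∀ (html : String), Dom_is_html_blocked html → Spec_is_html_blocked html (is_html_blocked html)

-- ===== LEMMAS AND PROOFS =====

theorem pvAnyOr {α : Type} (f g : α → Bool) (l : List α) :
    l.any (fun x => f x || g x) = (l.any f || l.any g) := by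
  induction l with
  | nil => rfl
  | cons x t ih => simp [List.any_cons, ih]; ac_rfl

theorem pvAccepts_empty (l : List Char) : pvAccepts (.node false .nil) l = false := by
  cases l <;> simp [pvAccepts, pvFind]

theorem pvFind_insertK_self (ch : PvKids) (c : Char) (p : List Char) :
    pvFind c (pvInsertK ch c p) =
      some (pvInsertT ((pvFind c ch).getD (.node false .nil)) p) :=
  match ch with
  | .nil => by simp [pvInsertK, pvFind]
  | .cons d t rest => by
      by_cases h : d = c
      · subst h; simp [pvInsertK, pvFind]
      · simp [pvInsertK, pvFind, h, pvFind_insertK_self rest c p]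

theorem pvFind_insertK_other (ch : PvKids) (c d : Char) (p : List Char) (hdc : d ≠ c) :
    pvFind d (pvInsertK ch c p) = pvFind d ch :=
  match ch with
  | .nil => by simp [pvInsertK, pvFind, Ne.symm hdc]
  | .cons e t rest => by
      by_cases h : e = c
      · subst h
        simp [pvInsertK, pvFind, Ne.symm hdc]
      · by_cases h2 : e = d
        · subst h2
          simp [pvInsertK, pvFind, h]
        · simp [pvInsertK, pvFind, h, h2, pvFind_insertK_other rest c d p hdc]

theorem pvAccepts_insertT (p : List Char) : ∀ (t : PvTrie) (l : List Char),
    pvAccepts (pvInsertT t p) l = (PySem.Chars.startswith l p || pvAccepts t l) := by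
  induction p with
  | nil =>
      intro t l
      obtain ⟨stop, ch⟩ := t
      have hsw : PySem.Chars.startswith l [] = true := by
        rw [PySem.Chars.startswith_iff]; exact List.nil_prefix
      cases l <;> simp [pvInsertT, pvAccepts, hsw]
  | cons c p' ih =>
      intro t l
      obtain ⟨stop, ch⟩ := t
      cases l with
      | nil =>
          have : PySem.Chars.startswith ([] : List Char) (c :: p') = false := by
            rw [Bool.eq_false_iff, ne_eq, PySem.Chars.startswith_iff]
            simp
          simp [pvInsertT, pvAccepts, this]
      | cons d r =>
          by_cases hdc : d = c
          · subst hdc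
            have hsw : PySem.Chars.startswith (d :: r) (d :: p') =
                PySem.Chars.startswith r p' := by
              rw [Bool.eq_iff_iff, PySem.Chars.startswith_iff, PySem.Chars.startswith_iff,
                List.cons_prefix_cons]
              simp
            simp only [pvInsertT, pvAccepts, pvFind_insertK_self, ih, hsw]
            cases hfind : pvFind d ch with
            | none => simp [pvAccepts_empty]; ac_rfl
            | some t' => simp; ac_rfl
          · have hsw : PySem.Chars.startswith (d :: r) (c :: p') = false := by
              rw [Bool.eq_false_iff, ne_eq, PySem.Chars.startswith_iff, List.cons_prefix_cons]
              exact fun h => absurd h.1.symm hdc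
            simp [pvInsertT, pvAccepts, pvFind_insertK_other ch c d p' hdc, hsw]

theorem pvAccepts_foldl (ps : List (List Char)) : ∀ (t : PvTrie) (l : List Char),
    pvAccepts (ps.foldl pvInsertT t) l =
      (ps.any (fun p => PySem.Chars.startswith l p) || pvAccepts t l) := by
  induction ps with
  | nil => intro t l; simp
  | cons p rest ih =>
      intro t l
      simp only [List.foldl_cons, ih, pvAccepts_insertT, List.any_cons]
      ac_rfl

theorem pvAccepts_root (l : List Char) :
    pvAccepts pvRoot l = pvPhrases.any (fun p => PySem.Chars.startswith l p) := by
  rw [pvRoot, pvAccepts_foldl, pvAccepts_empty]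
  simp

-- the trie scan over suffixes finds a phrase iff it is a substring (phrases are nonempty)
theorem pvScanT_eq_any_isIn (l : List Char) :
    pvScanT pvRoot l = pvPhrases.any (fun p => PySem.Chars.isIn p l) := by
  induction l with
  | nil =>
      simp only [pvScanT]
      symm
      simp only [List.any_eq_false]
      intro p hp
      rw [Bool.not_eq_true, PySem.Chars.isIn_eq_false_iff]
      intro hinf
      have hne : p ≠ [] := by
        simp only [pvPhrases, List.mem_cons, List.not_mem_nil, or_false] at hp
        rcases hp with rfl | rfl | rfl | rfl <;> decide
      exact hne (List.eq_nil_of_infix_nil hinf)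
  | cons c rest ih =>
      simp only [pvScanT, pvAccepts_root, ih]
      rw [← pvAnyOr]
      refine List.any_congr rfl (fun p => ?_)
      rw [Bool.eq_iff_iff]
      simp only [Bool.or_eq_true, PySem.Chars.startswith_iff, PySem.Chars.isIn_iff_infix,
        List.infix_cons_iff]

-- ===== VERDICT =====
theorem is_html_blocked_spec : Claim_equal_is_html_blocked := by
  intro html _
  unfold Spec_is_html_blocked is_html_blocked is_html_blocked_alt
  rw [pvScanT_eq_any_isIn]
  simp only [PySem.Str.isIn_eq, pvPhrases, List.any_cons, List.any_nil, PySem.Str.toList_lower]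
  rw [show PySem.Chars.lower "Please verify you are a human".toList = "please verify you are a human".toList from by decide,
      show PySem.Chars.lower "Please solve this CAPTCHA".toList = "please solve this captcha".toList from by decide,
      show PySem.Chars.lower "Access to this page has been denied".toList = "access to this page has been denied".toList from by decide,
      show PySem.Chars.lower "Your IP address has been temporarily blocked".toList = "your ip address has been temporarily blocked".toList from by decide]
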